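-- pv_equiv track=rewrite | github.com/EWNcode/Python-Advanced-2020 | Lambdas and Buit In Functions/negative_and_positive.py | solve
-- ===== SOURCE A (Python) =====
-- def solve(numbers):
--     result = ''
--     positive, negative = sum(x for x in numbers if x >= 0), sum(y for y in numbers if y < 0)
--     result += str(negative) + '\n'
--     result += str(positive) + '\n'
--     if positive < abs(negative):
--         result += "The negatives are stronger than the positives"
--     else:
--         result += "The positives are stronger than the negatives"
--
--     return result
-- ===== SOURCE B (Python) =====
-- def solve(numbers):
--     # Derive both partial sums arithmetically from two aggregates:
--     # total = P + N and sabs = P - N, so P = (total+sabs)//2, N = (total-sabs)//2,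
--     # and P < |N| iff total < 0.
--     total = sum(numbers)
--     sabs = sum(abs(x) for x in numbers)
--     negative = (total - sabs) // 2
--     positive = (total + sabs) // 2
--     verdict = ("The negatives are stronger than the positives"
--                if total < 0
--                else "The positives are stronger than the negatives")
--     return str(negative) + "\n" + str(positive) + "\n" + verdict
-- ===== Notes on version B (the rewrite author's own statement) =====
-- stated objective: alternative
-- what changed: Instead of filtering by sign, B computes the plain sum and the sum of absolute values and recovers the positive/negative partial sums by the closed forms (total+sabs)//2 and (total-sabs)//2, deciding the verdict by the sign of the total (positive < |negative| iff total < 0).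
import Mathlib
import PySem

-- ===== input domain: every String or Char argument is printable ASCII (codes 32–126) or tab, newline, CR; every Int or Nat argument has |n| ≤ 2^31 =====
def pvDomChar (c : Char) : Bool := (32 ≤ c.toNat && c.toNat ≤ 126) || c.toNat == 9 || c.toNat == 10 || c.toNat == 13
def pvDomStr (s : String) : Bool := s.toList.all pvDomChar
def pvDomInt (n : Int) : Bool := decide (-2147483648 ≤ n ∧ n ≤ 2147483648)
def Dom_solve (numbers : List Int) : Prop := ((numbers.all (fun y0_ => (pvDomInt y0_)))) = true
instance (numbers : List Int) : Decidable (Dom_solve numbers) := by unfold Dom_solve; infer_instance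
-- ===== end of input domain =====

-- B recovers the sign-filtered partial sums from the plain sum and the sum of
-- absolute values via closed forms, instead of filtering by sign; 'alternative'.

-- ===== PORT A =====
def solve (numbers : List Int) : String :=
  let result := ""
  let positive := (numbers.filter (fun x => decide (0 ≤ x))).sum
  let negative := (numbers.filter (fun y => decide (y < 0))).sum
  let result := result ++ PySem.Int.toStr negative ++ "\n"
  let result := result ++ PySem.Int.toStr positive ++ "\n"
  if positive < |negative| then
    result ++ "The negatives are stronger than the positives"
  else
    result ++ "The positives are stronger than the negatives"

-- ===== PORT B =====
def solve_alt (numbers : List Int) : String :=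
  let total := numbers.sum
  let sabs := (numbers.map (fun x => |x|)).sum
  let negative := PySem.Int.floordiv (total - sabs) 2
  let positive := PySem.Int.floordiv (total + sabs) 2
  let verdict := if total < 0 then
      "The negatives are stronger than the positives"
    else
      "The positives are stronger than the negatives"
  PySem.Int.toStr negative ++ "\n" ++ PySem.Int.toStr positive ++ "\n" ++ verdict

-- ===== PRECONDITION & SPEC =====
def Spec_solve (numbers : List Int) (out : String) : Prop := out = solve_alt numbers
instance (numbers : List Int) (out : String) : Decidable (Spec_solve numbers out) := by unfold Spec_solve; infer_instance

-- ===== CLAIM =====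
def Claim_equal_solve : Prop := ∀ (numbers : List Int), Dom_solve numbers → Spec_solve numbers (solve numbers)

-- ===== LEMMAS AND PROOFS =====
theorem solve_sum_split (numbers : List Int) :
    numbers.sum
      = (numbers.filter (fun x => decide (0 ≤ x))).sum
        + (numbers.filter (fun y => decide (y < 0))).sum := by
  induction numbers with
  | nil => simp
  | cons x xs ih =>
    by_cases h : 0 ≤ x
    · have h' : ¬ x < 0 := by omega
      simp [h, h', ih]; ring
    · have h' : x < 0 := by omega
      simp [h, h', ih]; ring

theorem solve_abs_split (numbers : List Int) :
    (numbers.map (fun x => |x|)).sum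
      = (numbers.filter (fun x => decide (0 ≤ x))).sum
        - (numbers.filter (fun y => decide (y < 0))).sum := by
  induction numbers with
  | nil => simp
  | cons x xs ih =>
    by_cases h : 0 ≤ x
    · have h' : ¬ x < 0 := by omega
      simp [h, h', ih, abs_of_nonneg h]; ring
    · have h' : x < 0 := by omega
      simp [h, h', ih, abs_of_neg h']; ring

theorem solve_neg_nonpos (numbers : List Int) :
    (numbers.filter (fun y => decide (y < 0))).sum ≤ 0 := by
  induction numbers with
  | nil => simp
  | cons x xs ih =>
    by_cases h : x < 0
    · simp [h]; omega
    · simp [h]; omega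

theorem floordiv_two_mul (p : Int) : PySem.Int.floordiv (2 * p) 2 = p := by
  rw [PySem.Int.floordiv_eq_ediv_of_pos (by omega)]
  omega

-- ===== VERDICT =====
theorem solve_spec : Claim_equal_solve := by
  intro numbers _
  unfold Spec_solve solve solve_alt
  have hs := solve_sum_split numbers
  have ha := solve_abs_split numbers
  have hn := solve_neg_nonpos numbers
  set P := (numbers.filter (fun x => decide (0 ≤ x))).sum with hP
  set N := (numbers.filter (fun y => decide (y < 0))).sum with hN
  have h1 : numbers.sum - (numbers.map (fun x => |x|)).sum = 2 * N := by omega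
  have h2 : numbers.sum + (numbers.map (fun x => |x|)).sum = 2 * P := by omega
  simp only [h1, h2, floordiv_two_mul]
  have h3 : (P < |N|) = (numbers.sum < 0) := by
    have : |N| = -N := abs_of_nonpos hn
    rw [this]
    simp only [eq_iff_iff]
    omega
  simp only [h3]
  split_ifs <;> rfl
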